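-- pv_equiv track=rewrite | github.com/douglasyao/CS122 | virus_assembly.py | generate_snp_matrix_from_strains
-- ===== SOURCE A (Python) =====
-- from collections import Counter, defaultdict
--
-- def generate_snp_matrix_from_strains(strains):
--     '''
--     :param strains: List of strain sequences
--     :return reference: The consensus sequence
--     :return snp_matrix: The SNP matrix
--     :return snp_inds: The indices of the SNPs in the reference
--     '''
--     snp_inds = []
--     snp_matrix = []
--     reference = ''
--     for ind, base in enumerate(zip(*strains)):
--         base = Counter(base)
--         cons = base.most_common(1)
--         if cons[0][1] < len(strains):
--             snp_inds.append(ind)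
--         reference += cons[0][0]
--     for strain in strains:
--         snp_row = [0 if reference[j] == strain[j] else 1 for j in snp_inds]
--         snp_matrix.append(snp_row)
--     return reference, snp_matrix, snp_inds
-- ===== SOURCE B (Python) =====
-- from collections import Counter
--
-- def generate_snp_matrix_from_strains(strains):
--     # Single pass over the columns: the SNP matrix rows are grown column by
--     # column instead of being rebuilt per strain in a second loop.
--     reference = ''
--     snp_inds = []
--     snp_matrix = [[] for _ in strains]
--     for ind, col in enumerate(zip(*strains)):
--         (ch, cnt), = Counter(col).most_common(1)
--         reference += ch
--         if cnt < len(strains):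
--             snp_inds.append(ind)
--             for row, base in zip(snp_matrix, col):
--                 row.append(0 if base == ch else 1)
--     return reference, snp_matrix, snp_inds
-- ===== Notes on version B (the rewrite author's own statement) =====
-- stated objective: simpler
-- what changed: B builds the SNP matrix rows column by column inside the single pass over zip(*strains), instead of A's second per-strain loop that re-indexes the finished reference string. (single pass over the data instead of two)
import Mathlib
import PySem

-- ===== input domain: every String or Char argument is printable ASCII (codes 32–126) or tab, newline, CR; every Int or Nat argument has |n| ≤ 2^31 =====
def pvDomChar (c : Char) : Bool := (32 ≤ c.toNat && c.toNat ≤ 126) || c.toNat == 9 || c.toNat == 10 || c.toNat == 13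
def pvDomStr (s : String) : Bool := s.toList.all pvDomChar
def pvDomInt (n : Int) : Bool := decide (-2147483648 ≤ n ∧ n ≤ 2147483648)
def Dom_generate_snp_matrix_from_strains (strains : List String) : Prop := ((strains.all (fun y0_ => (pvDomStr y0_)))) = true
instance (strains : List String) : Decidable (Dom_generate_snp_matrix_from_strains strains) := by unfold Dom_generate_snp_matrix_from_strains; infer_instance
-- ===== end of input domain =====

-- B builds the SNP matrix column by column in the single pass over zip(*strains),
-- instead of A's second per-strain loop indexing back into the reference; objective: simpler (one pass).

-- shared helper: zip(*strains) yields min-length many columns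
def pvMinLen (sls : List (List Char)) : Nat :=
  match sls with
  | [] => 0
  | s :: rest => rest.foldl (fun m t => min m t.length) s.length

-- shared helper: Counter(col).most_common(1)[0] — max count, ties to the first-inserted key
-- (most_common sorts the insertion-ordered items stably by descending count)
def pvMost (col : List Char) : Char × Int :=
  match (PySem.Dict.counter col).items with
  | [] => (' ', 0)   -- unreachable: columns are nonempty whenever they exist
  | p :: rest => rest.foldl (fun b q => if b.2 < q.2 then q else b) p

-- ===== PORT A =====
def generate_snp_matrix_from_strains (strains : List String) : String × List (List Int) × List Int :=
  let sls := strains.map String.toList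
  let n := pvMinLen sls
  -- first loop: for ind, base in enumerate(zip(*strains)): …
  let a := (List.range n).foldl (fun (st : List Int × List Char) (j : Nat) =>
      (if (pvMost (sls.map (fun s => s.getD j ' '))).2 < (strains.length : Int)
         then st.1 ++ [Int.ofNat j] else st.1,
       st.2 ++ [(pvMost (sls.map (fun s => s.getD j ' '))).1]))
    ([], [])
  -- second loop: for strain in strains: snp_row = [0 if reference[j] == strain[j] else 1 for j in snp_inds]
  let snp_matrix := sls.map (fun s =>
      a.1.map (fun j => if a.2.getD j.toNat ' ' == s.getD j.toNat ' ' then (0 : Int) else 1))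
  (String.ofList a.2, snp_matrix, a.1)

-- ===== PORT B =====
def generate_snp_matrix_from_strains_alt (strains : List String) : String × List (List Int) × List Int :=
  let sls := strains.map String.toList
  let n := pvMinLen sls
  -- single loop: grow reference, snp_matrix rows and snp_inds together
  let b := (List.range n).foldl (fun (st : List Char × List (List Int) × List Int) (j : Nat) =>
      if (pvMost (sls.map (fun s => s.getD j ' '))).2 < (strains.length : Int) then
        (st.1 ++ [(pvMost (sls.map (fun s => s.getD j ' '))).1],
         st.2.1.zipWith (fun row bc =>
             row ++ [if bc == (pvMost (sls.map (fun s => s.getD j ' '))).1 then (0 : Int) else 1])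
           (sls.map (fun s => s.getD j ' ')),
         st.2.2 ++ [Int.ofNat j])
      else
        (st.1 ++ [(pvMost (sls.map (fun s => s.getD j ' '))).1], st.2.1, st.2.2))
    ([], strains.map (fun _ => ([] : List Int)), [])
  (String.ofList b.1, b.2.1, b.2.2)

-- ===== PRECONDITION & SPEC =====
def Spec_generate_snp_matrix_from_strains (strains : List String) (out : String × List (List Int) × List Int) : Prop := out = generate_snp_matrix_from_strains_alt strains
instance (strains : List String) (out : String × List (List Int) × List Int) : Decidable (Spec_generate_snp_matrix_from_strains strains out) := by unfold Spec_generate_snp_matrix_from_strains; infer_instance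

-- ===== CLAIM (what is proved, stated in full; the proofs are below) =====
def Claim_equal_generate_snp_matrix_from_strains : Prop := ∀ (strains : List String), Dom_generate_snp_matrix_from_strains strains → Spec_generate_snp_matrix_from_strains strains (generate_snp_matrix_from_strains strains)

-- ===== LEMMAS AND PROOFS =====

theorem pv_getD_append_left (l l' : List Char) (i : Nat) (h : i < l.length) (d : Char) :
    (l ++ l').getD i d = l.getD i d := by
  simp [List.getD_eq_getElem?_getD, List.getElem?_append_left h]

theorem pv_getD_concat_length (l : List Char) (c d : Char) : (l ++ [c]).getD l.length d = c := by
  simp [List.getD_eq_getElem?_getD]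

theorem pv_zipWith_map_same {α β γ δ : Type} (f : β → γ → δ) (g : α → β) (h : α → γ) (l : List α) :
    List.zipWith f (l.map g) (l.map h) = l.map (fun x => f (g x) (h x)) := by
  induction l with
  | nil => rfl
  | cons a t ih => simp [ih]

theorem pv_char_beq_comm (a b : Char) : (a == b) = (b == a) := by
  by_cases h : a = b <;> simp [h, eq_comm]

theorem pv_loop_inv (strains : List String) (n : Nat) :
    (let sls := strains.map String.toList
     let a := (List.range n).foldl (fun (st : List Int × List Char) (j : Nat) =>
        (if (pvMost (sls.map (fun s => s.getD j ' '))).2 < (strains.length : Int)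
           then st.1 ++ [Int.ofNat j] else st.1,
         st.2 ++ [(pvMost (sls.map (fun s => s.getD j ' '))).1]))
       ([], [])
     let b := (List.range n).foldl (fun (st : List Char × List (List Int) × List Int) (j : Nat) =>
        if (pvMost (sls.map (fun s => s.getD j ' '))).2 < (strains.length : Int) then
          (st.1 ++ [(pvMost (sls.map (fun s => s.getD j ' '))).1],
           st.2.1.zipWith (fun row bc =>
               row ++ [if bc == (pvMost (sls.map (fun s => s.getD j ' '))).1 then (0 : Int) else 1])
             (sls.map (fun s => s.getD j ' ')),
           st.2.2 ++ [Int.ofNat j])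
        else
          (st.1 ++ [(pvMost (sls.map (fun s => s.getD j ' '))).1], st.2.1, st.2.2))
       ([], strains.map (fun _ => ([] : List Int)), [])
     b.1 = a.2 ∧ b.2.2 = a.1 ∧ a.2.length = n ∧ (∀ x ∈ a.1, 0 ≤ x ∧ x.toNat < n) ∧
       b.2.1 = sls.map (fun s =>
         a.1.map (fun j => if a.2.getD j.toNat ' ' == s.getD j.toNat ' ' then (0 : Int) else 1))) := by
  induction n with
  | zero =>
    simp [List.map_map, Function.comp_def, List.map_const']
  | succ n ih =>
    simp only [List.range_succ, List.foldl_append, List.foldl_cons, List.foldl_nil] at *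
    obtain ⟨h1, h2, h3, h4, h5⟩ := ih
    set sls := strains.map String.toList with hsls
    set a := (List.range n).foldl (fun (st : List Int × List Char) (j : Nat) =>
        (if (pvMost (sls.map (fun s => s.getD j ' '))).2 < (strains.length : Int)
           then st.1 ++ [Int.ofNat j] else st.1,
         st.2 ++ [(pvMost (sls.map (fun s => s.getD j ' '))).1]))
       ([], []) with ha
    set b := (List.range n).foldl (fun (st : List Char × List (List Int) × List Int) (j : Nat) =>
        if (pvMost (sls.map (fun s => s.getD j ' '))).2 < (strains.length : Int) then
          (st.1 ++ [(pvMost (sls.map (fun s => s.getD j ' '))).1],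
           st.2.1.zipWith (fun row bc =>
               row ++ [if bc == (pvMost (sls.map (fun s => s.getD j ' '))).1 then (0 : Int) else 1])
             (sls.map (fun s => s.getD j ' ')),
           st.2.2 ++ [Int.ofNat j])
        else
          (st.1 ++ [(pvMost (sls.map (fun s => s.getD j ' '))).1], st.2.1, st.2.2))
       ([], strains.map (fun _ => ([] : List Int)), []) with hb
    -- the old indicator entries are unchanged by appending to the reference
    have hkeep : ∀ (s : List Char) (c : Char),
        a.1.map (fun j => if (a.2 ++ [c]).getD j.toNat ' ' == s.getD j.toNat ' ' then (0 : Int) else 1)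
        = a.1.map (fun j => if a.2.getD j.toNat ' ' == s.getD j.toNat ' ' then (0 : Int) else 1) := by
      intro s c
      apply List.map_congr_left
      intro x hx
      rw [pv_getD_append_left a.2 [c] x.toNat (by rw [h3]; exact (h4 x hx).2) ' ']
    by_cases hc : (pvMost (sls.map (fun s => s.getD n ' '))).2 < (strains.length : Int)
    · simp only [hc, if_pos]
      refine ⟨by rw [h1], by rw [h2], by simp [h3], ?_, ?_⟩
      · intro x hx
        rcases List.mem_append.1 hx with h | h
        · exact ⟨(h4 x h).1, Nat.lt_succ_of_lt (h4 x h).2⟩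
        · simp at h; subst h; simp
      · rw [h5, pv_zipWith_map_same]
        apply List.map_congr_left
        intro s _
        simp only [List.map_append, hkeep]
        congr 1
        simp only [List.map_cons, List.map_nil]
        rw [show (Int.ofNat n).toNat = n from rfl, ← h3, pv_getD_concat_length, pv_char_beq_comm]
    · simp only [hc, if_false]
      refine ⟨by rw [h1], by rw [h2], by simp [h3], ?_, ?_⟩
      · intro x hx; exact ⟨(h4 x hx).1, Nat.lt_succ_of_lt (h4 x hx).2⟩
      · rw [h5]
        apply List.map_congr_left
        intro s _
        exact (hkeep s _).symm

-- ===== VERDICT (by name: the statement is the Claim_ definition above) =====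
theorem generate_snp_matrix_from_strains_spec : Claim_equal_generate_snp_matrix_from_strains := by
  intro strains _
  unfold Spec_generate_snp_matrix_from_strains
  unfold generate_snp_matrix_from_strains generate_snp_matrix_from_strains_alt
  obtain ⟨h1, h2, h3, h4, h5⟩ := pv_loop_inv strains (pvMinLen (strains.map String.toList))
  simp only [h1, h2, h5]
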